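-- pv_equiv track=rewrite | github.com/TSS-CH/MAS-004_RPI-Databridge | mas004_rpi_databridge/device_bridge.py | _extract_ultimate_value
-- ===== SOURCE A (Python) =====
-- from typing import Optional
--
-- def _extract_ultimate_value(var_name: str, args: list[str]) -> Optional[str]:
--     vname = (var_name or "").strip()
--     if not args:
--         return None
--
--     for a in args:
--         if "=" in a:
--             k, v = a.split("=", 1)
--             if k.strip() == vname:
--                 return v.strip()
--
--     if len(args) >= 2:
--         for idx in range(len(args) - 1):
--             if args[idx].strip() == vname:
--                 return args[idx + 1].strip()
--
--     if len(args) == 1: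
--         return args[0].strip()
--
--     return None
-- ===== SOURCE B (Python) =====
-- def _extract_ultimate_value(var_name, args):
--     vname = (var_name or "").strip()
--     if not args:
--         return None
--     eq_hit = None
--     pair_hit = None
--     prev_matched = False
--     for a in args:
--         s = a.strip()
--         if pair_hit is None and prev_matched:
--             pair_hit = s
--         if eq_hit is None and "=" in a:
--             k, v = a.split("=", 1)
--             if k.strip() == vname:
--                 eq_hit = v.strip()
--         prev_matched = s == vname
--     if eq_hit is not None:
--         return eq_hit
--     if pair_hit is not None:
--         return pair_hit
--     if len(args) == 1:
--         return args[0].strip()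
--     return None
-- ===== Notes on version B (the rewrite author's own statement) =====
-- stated objective: alternative
-- what changed: Replaces A's three staged scans (the '=' scan, the indexed adjacent-pair scan over range(len-1), the single-arg check) by ONE pass over args that maintains three accumulators (first '=' match, first adjacent-pair match, whether the previous stripped arg equalled vname), combining the accumulators only after the loop.
import Mathlib
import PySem

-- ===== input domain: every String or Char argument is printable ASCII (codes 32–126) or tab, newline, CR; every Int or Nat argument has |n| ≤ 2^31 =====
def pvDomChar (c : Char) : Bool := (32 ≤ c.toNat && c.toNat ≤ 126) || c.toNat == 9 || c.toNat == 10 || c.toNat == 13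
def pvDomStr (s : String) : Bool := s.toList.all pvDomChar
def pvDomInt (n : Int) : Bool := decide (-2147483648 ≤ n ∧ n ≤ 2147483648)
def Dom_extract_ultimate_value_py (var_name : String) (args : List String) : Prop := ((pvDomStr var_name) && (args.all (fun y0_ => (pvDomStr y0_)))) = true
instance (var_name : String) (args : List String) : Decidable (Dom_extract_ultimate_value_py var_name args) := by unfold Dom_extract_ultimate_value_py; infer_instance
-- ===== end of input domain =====

-- B replaces A's three staged scans by ONE pass over args with three accumulators
-- (first '=' match, first adjacent-pair match, previous-arg flag); objective: alternative.

-- ===== PORT A =====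
-- first loop of A: scan args, return v.strip() for the first 'k=v' with k.strip() == vname
def pvA_eqLoop (vname : String) : List String → Option String
  | [] => none
  | a :: rest =>
    if PySem.Str.isIn "=" a then
      match PySem.Str.splitMax? a "=" 1 with
      | some (k :: v :: _) =>
        if PySem.Str.strip k = vname then some (PySem.Str.strip v) else pvA_eqLoop vname rest
      | _ => pvA_eqLoop vname rest   -- unreachable: split(sep, 1) with sep present yields two pieces
    else pvA_eqLoop vname rest

-- second loop of A: for idx in range(len(args)-1): …
def pvA_pairLoop (vname : String) (args : List String) : List Int → Option String
  | [] => none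
  | idx :: rest =>
    if PySem.Str.strip (PySem.List.pyGetD args idx "") = vname then
      some (PySem.Str.strip (PySem.List.pyGetD args (idx + 1) ""))
    else pvA_pairLoop vname args rest

def extract_ultimate_value_py (var_name : String) (args : List String) : Option String :=
  let vname := PySem.Str.strip var_name   -- (var_name or "").strip(): identical for every string
  if args = [] then none
  else
    match pvA_eqLoop vname args with
    | some r => some r
    | none =>
      match (if 2 ≤ args.length then
               pvA_pairLoop vname args (PySem.List.pyRange 0 ((args.length : Int) - 1) 1)
             else none) with
      | some r => some r
      | none =>
        if args.length = 1 then some (PySem.Str.strip (PySem.List.pyGetD args 0 "")) else none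

-- ===== PORT B =====
-- one body of B's single loop: state = (eq_hit, pair_hit, prev_matched)
def pvB_step (vname : String) (st : Option String × Option String × Bool) (a : String) :
    Option String × Option String × Bool :=
  let s := PySem.Str.strip a
  let pair_hit := if st.2.1.isNone && st.2.2 then some s else st.2.1
  let eq_hit :=
    if st.1.isNone && PySem.Str.isIn "=" a then
      match PySem.Str.splitMax? a "=" 1 with
      | some (k :: v :: _) => if PySem.Str.strip k = vname then some (PySem.Str.strip v) else st.1
      | _ => st.1
    else st.1
  (eq_hit, pair_hit, s == vname)

def extract_ultimate_value_py_alt (var_name : String) (args : List String) : Option String :=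
  let vname := PySem.Str.strip var_name
  if args = [] then none
  else
    let st := args.foldl (pvB_step vname) (none, none, false)
    match st.1 with
    | some r => some r
    | none =>
      match st.2.1 with
      | some r => some r
      | none => if args.length = 1 then some (PySem.Str.strip (args.getD 0 "")) else none

-- ===== PRECONDITION & SPEC =====
def Spec_extract_ultimate_value_py (var_name : String) (args : List String) (out : Option String) : Prop := out = extract_ultimate_value_py_alt var_name args
instance (var_name : String) (args : List String) (out : Option String) : Decidable (Spec_extract_ultimate_value_py var_name args out) := by unfold Spec_extract_ultimate_value_py; infer_instance

-- ===== CLAIM =====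
def Claim_equal_extract_ultimate_value_py : Prop := ∀ (var_name : String) (args : List String), Dom_extract_ultimate_value_py var_name args → Spec_extract_ultimate_value_py var_name args (extract_ultimate_value_py var_name args)

-- ===== LEMMAS AND PROOFS =====

-- what B's pair accumulator computes, as a recursion on the list
def pvPrevLoop (vname : String) : Bool → List String → Option String
  | _, [] => none
  | prev, a :: rest =>
    if prev then some (PySem.Str.strip a)
    else pvPrevLoop vname (PySem.Str.strip a == vname) rest

-- invariant of B's single fold: its first two components are the staged answers
lemma fold_inv (v : String) : ∀ (xs : List String) (e p : Option String) (prev : Bool),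
    (xs.foldl (pvB_step v) (e, p, prev)).1 =
      (match e with | some r => some r | none => pvA_eqLoop v xs) ∧
    (xs.foldl (pvB_step v) (e, p, prev)).2.1 =
      (match p with | some r => some r | none => pvPrevLoop v prev xs) := by
  intro xs
  induction xs with
  | nil =>
    intro e p prev
    constructor <;> cases e <;> cases p <;> simp [pvA_eqLoop, pvPrevLoop]
  | cons a rest ih =>
    intro e p prev
    simp only [List.foldl_cons, pvB_step]
    obtain ⟨ih1, ih2⟩ := ih
      (if e.isNone && PySem.Str.isIn "=" a then
        match PySem.Str.splitMax? a "=" 1 with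
        | some (k :: v' :: _) => if PySem.Str.strip k = v then some (PySem.Str.strip v') else e
        | _ => e
       else e)
      (if p.isNone && prev then some (PySem.Str.strip a) else p)
      (PySem.Str.strip a == v)
    refine ⟨?_, ?_⟩
    · rw [ih1]
      cases e with
      | some r => simp
      | none =>
        simp only [Option.isNone_none, Bool.true_and, pvA_eqLoop]
        by_cases hin : PySem.Str.isIn "=" a = true
        · rw [if_pos hin, if_pos hin]
          cases hsp : PySem.Str.splitMax? a "=" 1 with
          | none => simp
          | some l =>
            match l with
            | [] => simp
            | [k] => simp
            | k :: v' :: t =>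
              by_cases hk : PySem.Str.strip k = v
              · simp [hk]
              · simp [hk]
        · rw [if_neg hin, if_neg hin]
    · rw [ih2]
      cases p with
      | some r => simp
      | none =>
        simp only [Option.isNone_none, Bool.true_and, pvPrevLoop]
        cases prev with
        | true => simp
        | false => simp

-- B's prev-flag recursion satisfies the adjacent-pair recurrence
lemma prevLoop_cons_cons (v a b : String) (rest : List String) :
    pvPrevLoop v false (a :: b :: rest) =
      (if PySem.Str.strip a = v then some (PySem.Str.strip b)
       else pvPrevLoop v false (b :: rest)) := by
  simp only [pvPrevLoop]
  by_cases h : PySem.Str.strip a = v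
  · simp [h]
  · simp only [h]
    have hb : (PySem.Str.strip a == v) = false := by
      simp [h]
    rw [hb]
    simp

-- shift: the index loop over 1+k on (x :: xs) is the loop over k on xs
lemma pairLoop_shift (vname x : String) (xs : List String) :
    ∀ (is : List Nat),
      pvA_pairLoop vname (x :: xs) (is.map (fun (k : Nat) => (1 : Int) + (k : Int))) =
      pvA_pairLoop vname xs (is.map (fun (k : Nat) => ((k : Int)))) := by
  intro is
  induction is with
  | nil => rfl
  | cons i rest ih =>
    simp only [List.map_cons, pvA_pairLoop]
    rw [show (1 : Int) + (i : Int) = ((i + 1 : Nat) : Int) by push_cast; ring]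
    rw [show ((i + 1 : Nat) : Int) + 1 = ((i + 2 : Nat) : Int) by push_cast; ring]
    rw [show ((i : Int)) + 1 = ((i + 1 : Nat) : Int) by push_cast; ring]
    rw [PySem.List.pyGetD_natCast, PySem.List.pyGetD_natCast,
        PySem.List.pyGetD_natCast, PySem.List.pyGetD_natCast]
    rw [show i + 2 = (i + 1) + 1 from rfl]
    simp only [List.getD_cons_succ]
    rw [ih]

-- A's indexed adjacent-pair loop = B's prev-flag recursion started with prev = false
lemma pair_eq (vname : String) : ∀ (xs : List String),
    pvA_pairLoop vname xs (PySem.List.pyRange 0 ((xs.length : Int) - 1) 1) =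
    pvPrevLoop vname false xs := by
  intro xs
  induction xs with
  | nil => simp [PySem.List.pyRange_one_eq_nil, pvA_pairLoop, pvPrevLoop]
  | cons a xs ih =>
    cases xs with
    | nil => simp [PySem.List.pyRange_one_eq_nil, pvA_pairLoop, pvPrevLoop]
    | cons b rest =>
      have hlen : (0 : Int) < ((a :: b :: rest).length : Int) - 1 := by
        simp only [List.length_cons]; push_cast; omega
      rw [PySem.List.pyRange_one_cons hlen]
      rw [prevLoop_cons_cons]
      simp only [pvA_pairLoop]
      rw [show ((0 : Int) + 1) = ((1 : Nat) : Int) by norm_num]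
      rw [PySem.List.pyGetD_zero_cons, PySem.List.pyGetD_natCast]
      simp only [List.getD_cons_succ, List.getD_cons_zero]
      by_cases h : PySem.Str.strip a = vname
      · rw [if_pos h, if_pos h]
      · rw [if_neg h, if_neg h]
        rw [show (((1 : Nat) : Int)) = (1 : Int) from rfl]
        rw [PySem.List.pyRange_one 1]
        rw [show ((((a :: b :: rest).length : Int) - 1) - 1).toNat = rest.length by
              simp only [List.length_cons]; push_cast; omega]
        rw [pairLoop_shift]
        rw [PySem.List.pyRange_one 0] at ih
        rw [show ((((b :: rest).length : Int) - 1) - 0).toNat = rest.length by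
              simp only [List.length_cons]; push_cast; omega] at ih
        simp only [zero_add] at ih
        exact ih

-- ===== VERDICT =====
theorem extract_ultimate_value_py_spec : Claim_equal_extract_ultimate_value_py := by
  intro var_name args _
  unfold Spec_extract_ultimate_value_py extract_ultimate_value_py extract_ultimate_value_py_alt
  cases args with
  | nil => rfl
  | cons a xs =>
    simp only [reduceIte, List.cons_ne_nil]
    obtain ⟨h1, h2⟩ := fold_inv (PySem.Str.strip var_name) (a :: xs) none none false
    rw [h1, h2]
    cases pvA_eqLoop (PySem.Str.strip var_name) (a :: xs) with
    | some r => rfl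
    | none =>
      rw [← pair_eq]
      cases xs with
      | nil =>
        simp [PySem.List.pyRange_one_eq_nil, pvA_pairLoop, PySem.List.pyGetD_zero_cons]
      | cons b rest =>
        have h2' : 2 ≤ (a :: b :: rest).length := by simp [List.length_cons]
        rw [if_pos h2']
        cases pvA_pairLoop (PySem.Str.strip var_name) (a :: b :: rest)
            (PySem.List.pyRange 0 (((a :: b :: rest).length : Int) - 1) 1) with
        | some r => rfl
        | none =>
          have h1' : (a :: b :: rest).length ≠ 1 := by simp
          rw [if_neg h1', if_neg h1']
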